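-- pv_equiv track=rewrite | github.com/sungnyun/openssl-simcore | downstream/semisup/util/methods.py | _interleave_offsets
-- ===== SOURCE A (Python) =====
-- def _interleave_offsets(batch, nu):
--     groups = [batch // (nu + 1)] * (nu + 1)
--     for x in range(batch - sum(groups)):
--         groups[-x - 1] += 1
--     offsets = [0]
--     for g in groups:
--         offsets.append(offsets[-1] + g)
--     assert offsets[-1] == batch
--     return offsets
-- ===== SOURCE B (Python) =====
-- def _interleave_offsets(batch, nu):
--     # closed form: first (nu+1-r) groups get q, the last r groups get q+1
--     q, r = divmod(batch, nu + 1)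
--     offsets = [i * q + max(0, i - (nu + 1 - r)) for i in range(nu + 2)]
--     assert offsets[-1] == batch
--     return offsets
-- ===== Notes on version B (the rewrite author's own statement) =====
-- stated objective: simpler
-- what changed: B replaces A's two sequential loops (distribute the remainder over a groups list, then prefix-sum it) by a single comprehension using the closed form offsets[i] = i*q + max(0, i - (nu+1-r)) with q, r = divmod(batch, nu+1), never materialising the groups list.
-- outside the precondition, e.g. on _interleave_offsets(0, -2): A returns [0], B raises IndexError; on _interleave_offsets(3, -1): A raises ZeroDivisionError, B raises ZeroDivisionError; on _interleave_offsets(5, -3): A raises IndexError, B raises IndexError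
import Mathlib
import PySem

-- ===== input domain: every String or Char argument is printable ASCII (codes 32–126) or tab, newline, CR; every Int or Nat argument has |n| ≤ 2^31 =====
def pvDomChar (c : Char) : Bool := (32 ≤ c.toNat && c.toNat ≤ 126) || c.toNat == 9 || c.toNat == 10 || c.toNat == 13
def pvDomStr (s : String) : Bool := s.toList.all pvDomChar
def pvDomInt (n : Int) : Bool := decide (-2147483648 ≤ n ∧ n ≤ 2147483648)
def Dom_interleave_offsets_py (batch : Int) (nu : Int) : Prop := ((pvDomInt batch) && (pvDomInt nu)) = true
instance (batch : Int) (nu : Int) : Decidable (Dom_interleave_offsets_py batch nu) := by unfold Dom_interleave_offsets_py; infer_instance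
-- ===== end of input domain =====

-- B replaces A's remainder-distribution loop and prefix-sum loop by one closed-form comprehension
-- offsets[i] = i*q + max(0, i - (nu+1-r)) with q, r = divmod(batch, nu+1)  (objective: simpler).

-- ===== PORT A =====
-- the 'assert offsets[-1] == batch' always passes for nu ≥ 0 (Pre_) and is not re-checked here;
-- the pyGetD/pySetD defaults are never taken under Pre_ (the list is nonempty / the index in range).
def interleave_offsets_py (batch : Int) (nu : Int) : List Int :=
  let groups := PySem.List.pyRepeat [PySem.Int.floordiv batch (nu + 1)] (nu + 1)
  let groups := (PySem.List.pyRange 0 (batch - groups.sum) 1).foldl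
    (fun gs x => PySem.List.pySetD gs (-x - 1) (PySem.List.pyGetD gs (-x - 1) 0 + 1)) groups
  groups.foldl (fun off g => off ++ [PySem.List.pyGetD off (-1) 0 + g]) [0]

-- ===== PORT B =====
-- the 'assert offsets[-1] == batch' always passes for nu ≥ 0 (Pre_) and is not re-checked here.
def interleave_offsets_py_alt (batch : Int) (nu : Int) : List Int :=
  let q := PySem.Int.floordiv batch (nu + 1)
  let r := PySem.Int.mod batch (nu + 1)
  (PySem.List.pyRange 0 (nu + 2) 1).map (fun i => i * q + max 0 (i - (nu + 1 - r)))

-- ===== PRECONDITION & SPEC =====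
-- Pre_ excludes negative nu: there A raises (ZeroDivisionError at nu = -1, IndexError or a failing
-- assert otherwise) except at the degenerate batch = 0, nu ≤ -2, where A's [0] is an artefact of the
-- empty groups list and B itself raises (IndexError on offsets[-1]).
def Pre_interleave_offsets_py (batch : Int) (nu : Int) : Prop := 0 ≤ nu
instance (batch : Int) (nu : Int) : Decidable (Pre_interleave_offsets_py batch nu) := by unfold Pre_interleave_offsets_py; infer_instance
def pvWitness_interleave_offsets_py : Int × Int := (10, 2)
def Spec_interleave_offsets_py (batch : Int) (nu : Int) (out : List Int) : Prop := out = interleave_offsets_py_alt batch nu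
instance (batch : Int) (nu : Int) (out : List Int) : Decidable (Spec_interleave_offsets_py batch nu out) := by unfold Spec_interleave_offsets_py; infer_instance

-- ===== CLAIM (what is proved, stated in full; the proofs are below) =====
def Claim_equal_interleave_offsets_py : Prop := ∀ (batch : Int) (nu : Int), Dom_interleave_offsets_py batch nu → Pre_interleave_offsets_py batch nu → Spec_interleave_offsets_py batch nu (interleave_offsets_py batch nu)

-- ===== LEMMAS AND PROOFS =====

-- xs[-k-1] and xs[-k-1] = v for 0 ≤ k < len, unfolding the pyGet/pySet primitives
theorem pySetD_neg_succ {α : Type} (xs : List α) (k : Nat) (v : α) (h : k < xs.length) :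
    PySem.List.pySetD xs (-(k : Int) - 1) v = xs.set (xs.length - (k + 1)) v := by
  simp [PySem.List.pySetD, PySem.List.pySet?, PySem.List.pyIdx?]
  rw [if_neg (by omega), if_pos (by omega)]
  simp
  congr 1
  omega

theorem pyGetD_neg_succ {α : Type} (xs : List α) (k : Nat) (d : α) (h : k < xs.length) :
    PySem.List.pyGetD xs (-(k : Int) - 1) d = xs.getD (xs.length - (k + 1)) d := by
  have h2 : ((1:Int) + (k:Int)).toNat = k + 1 := by omega
  simp [PySem.List.pyGetD, PySem.List.pyGet?, PySem.List.pyIdx?]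
  rw [if_neg (by omega), if_pos (by omega)]
  simp [h2]

-- one round of the remainder loop bumps the last untouched group from q to q+1
theorem incStep (q : Int) (k n : Nat) (hk : k < n) :
    (List.replicate (n-k) q ++ List.replicate k (q+1)).set (n - (k+1))
      ((List.replicate (n-k) q ++ List.replicate k (q+1)).getD (n-(k+1)) 0 + 1)
    = List.replicate (n-(k+1)) q ++ List.replicate (k+1) (q+1) := by
  have hget : (List.replicate (n-k) q ++ List.replicate k (q+1)).getD (n-(k+1)) 0 = q := by
    rw [List.getD_eq_getElem?_getD, List.getElem?_append_left (by simp; omega),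
      List.getElem?_replicate, if_pos (by omega)]
    rfl
  rw [hget, List.set_append, if_pos (by simp; omega)]
  have h1 : n - k = (n-(k+1)) + 1 := by omega
  rw [h1, List.replicate_succ', List.set_append, if_neg (by simp), List.append_assoc]
  simp [List.replicate_succ]

-- after k rounds of the remainder loop the last k groups have been bumped to q+1
theorem incLoop (q : Int) (k n : Nat) (hk : k ≤ n) :
    (PySem.List.pyRange 0 (k : Int) 1).foldl
      (fun gs x => PySem.List.pySetD gs (-x - 1) (PySem.List.pyGetD gs (-x - 1) 0 + 1))
      (List.replicate n q)
    = List.replicate (n - k) q ++ List.replicate k (q + 1) := by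
  induction k with
  | zero => simp [PySem.List.pyRange_one_eq_nil]
  | succ k ih =>
    have h1 : ((k + 1 : Nat) : Int) = (k : Int) + 1 := by push_cast; ring
    rw [h1, PySem.List.pyRange_one_succ_right (by positivity), List.foldl_append, ih (by omega)]
    simp only [List.foldl_cons, List.foldl_nil]
    have hL : (List.replicate (n - k) q ++ List.replicate k (q + 1)).length = n := by
      simp; omega
    rw [pyGetD_neg_succ _ k _ (by omega), pySetD_neg_succ _ k _ (by omega), hL]
    exact incStep q k n (by omega)

-- the offsets loop appends the running total: it is scanl (+)
theorem offsetsLoop (l : List Int) : ∀ (a : List Int) (t : Int),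
    l.foldl (fun off g => off ++ [PySem.List.pyGetD off (-1) 0 + g]) (a ++ [t])
    = a ++ List.scanl (· + ·) t l := by
  induction l with
  | nil => intro a t; simp [List.scanl_nil]
  | cons g l ih =>
    intro a t
    simp only [List.foldl_cons, PySem.List.pyGetD_neg_one_append_singleton, List.scanl_cons]
    rw [ih (a ++ [t]) (t + g)]
    simp

theorem scanl_add_replicate (k : Nat) : ∀ (t g : Int),
    List.scanl (· + ·) t (List.replicate k g)
    = (List.range (k + 1)).map (fun i : Nat => t + (i : Int) * g) := by
  induction k with
  | zero => intro t g; simp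
  | succ k ih =>
    intro t g
    rw [List.replicate_succ, List.scanl_cons, ih (t + g) g]
    conv_rhs => rw [List.range_succ_eq_map, List.map_cons, List.map_map]
    congr 1
    · simp
    · apply List.map_congr_left; intro i _; simp [Function.comp]; ring

theorem scanl_add_append (l₁ l₂ : List Int) : ∀ (t : Int),
    List.scanl (· + ·) t (l₁ ++ l₂)
    = List.scanl (· + ·) t l₁ ++ (List.scanl (· + ·) (t + l₁.sum) l₂).tail := by
  induction l₁ with
  | nil =>
    intro t
    cases l₂ <;> simp [List.scanl_nil, List.scanl_cons]
  | cons x l₁ ih =>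
    intro t
    simp only [List.cons_append, List.scanl_cons, ih (t + x), List.sum_cons]
    rw [add_assoc]

-- ===== VERDICT (by name: the statement is the Claim_ definition above) =====
theorem interleave_offsets_py_spec : Claim_equal_interleave_offsets_py := by
  intro batch nu _ hnu
  have hnu' : 0 ≤ nu := hnu
  unfold Spec_interleave_offsets_py interleave_offsets_py interleave_offsets_py_alt
  set m : Int := nu + 1 with hm
  have hmpos : 0 < m := by omega
  set q : Int := PySem.Int.floordiv batch m with hq
  set r : Int := PySem.Int.mod batch m with hr
  have hqr : q * m + r = batch := PySem.Int.floordiv_mul_add_mod batch m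
  have hr0 : 0 ≤ r := PySem.Int.mod_nonneg batch hmpos
  have hrm : r < m := PySem.Int.mod_lt batch hmpos
  set n : Nat := m.toNat with hn
  have hnm : (n : Int) = m := by omega
  set b : Nat := r.toNat with hb
  have hbr : (b : Int) = r := by omega
  set a : Nat := (m - r).toNat with ha
  have ham : (a : Int) = m - r := by omega
  have hab : a + b = n := by omega
  simp only [PySem.List.pyRepeat_singleton]
  have hsum : (List.replicate (m.toNat) q).sum = (n : Int) * q := by
    rw [List.sum_replicate, ← hn]; simp
  have hrem : batch - (List.replicate (m.toNat) q).sum = (b : Int) := by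
    rw [hsum, hnm, hbr]; linarith
  rw [hrem, ← hn, incLoop q b n (by omega)]
  have h0 : ([0] : List Int) = [] ++ [0] := rfl
  rw [h0, offsetsLoop, List.nil_append]
  have hnb : n - b = a := by omega
  rw [hnb, scanl_add_append, scanl_add_replicate, scanl_add_replicate]
  have hsa : (List.replicate a q).sum = (a : Int) * q := by
    rw [List.sum_replicate]; simp
  rw [hsa]
  -- the tail drops the i = 0 entry of the second scanl
  conv_lhs => rw [List.range_succ_eq_map (n := b), List.map_cons, List.tail_cons, List.map_map]
  -- the B side is a map over range (n+1)
  have hn2 : nu + 2 = ((n + 1 : Nat) : Int) := by omega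
  rw [hn2, PySem.List.pyRange_one, List.map_map]
  have hz : ((n + 1 : Nat) : Int) - 0 = ((n + 1 : Nat) : Int) := by ring
  rw [hz, Int.toNat_natCast]
  have hsplit : n + 1 = (a + 1) + b := by omega
  rw [hsplit]
  conv_rhs => rw [List.range_add, List.map_append, List.map_map]
  congr 1
  · apply List.map_congr_left
    intro i hi
    rw [List.mem_range] at hi
    simp only [Function.comp]
    have h2 : max 0 ((0 : Int) + (i : Int) - (m - r)) = 0 := by omega
    rw [h2]
    ring
  · apply List.map_congr_left
    intro i _
    simp only [Function.comp]
    have h2 : max 0 ((0 : Int) + ((a + 1 + i : Nat) : Int) - (m - r)) = (i : Int) + 1 := by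
      push_cast; omega
    rw [h2]
    push_cast
    ring
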